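-- pv_equiv track=rewrite | github.com/jcolinpatrick/kryptos | scripts/grille/e_morse_grid14_overlay.py | gen_col_reading
-- ===== SOURCE A (Python) =====
-- MORSE = {
--     'A': '.-',    'B': '-...',  'C': '-.-.',  'D': '-..',
--     'E': '.',     'F': '..-.',  'G': '--.',   'H': '....',
--     'I': '..',    'J': '.---',  'K': '-.-',   'L': '.-..',
--     'M': '--',    'N': '-.',    'O': '---',   'P': '.--.',
--     'Q': '--.-',  'R': '.-.',   'S': '...',   'T': '-',
--     'U': '..-',   'V': '...-',  'W': '.--',   'X': '-..-',
--     'Y': '-.--',  'Z': '--..',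
-- }
--
-- def gen_symbol_stream(tokens, dot_val=0, dash_val=1):
--     """Convert token sequence to symbol stream (dot/dash → binary)."""
--     bits = []
--     for t in tokens:
--         letter = t.upper()
--         morse = MORSE[letter]
--         for sym in morse:
--             bits.append(dot_val if sym == '.' else dash_val)
--     return bits
--
-- def gen_col_reading(tokens, width):
--     """Write symbol stream into grid by rows, read by columns."""
--     symbols = gen_symbol_stream(tokens)
--     rows = (len(symbols) + width - 1) // width
--     grid_size = rows * width
--     padded = symbols + [0] * (grid_size - len(symbols))
--
--     result = []
--     for c in range(width):
--         for r in range(rows):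
--             result.append(padded[r * width + c])
--     return result
-- ===== SOURCE B (Python) =====
-- MORSE = {
--     'A': '.-',    'B': '-...',  'C': '-.-.',  'D': '-..',
--     'E': '.',     'F': '..-.',  'G': '--.',   'H': '....',
--     'I': '..',    'J': '.---',  'K': '-.-',   'L': '.-..',
--     'M': '--',    'N': '-.',    'O': '---',   'P': '.--.',
--     'Q': '--.-',  'R': '.-.',   'S': '...',   'T': '-',
--     'U': '..-',   'V': '...-',  'W': '.--',   'X': '-..-',
--     'Y': '-.--',  'Z': '--..',
-- }
--
-- def gen_col_reading(tokens, width):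
--     """Distribute morse bits into per-column buckets in one pass, then concatenate."""
--     cols = [[] for _ in range(width)]
--     if not cols:
--         return []
--     n = 0
--     for t in tokens:
--         for sym in MORSE[t.upper()]:
--             cols[n % width].append(0 if sym == '.' else 1)
--             n += 1
--     if n % width:
--         for c in range(n % width, width):   # zero-pad the final partial row
--             cols[c].append(0)
--     return [b for col in cols for b in col]
-- ===== Notes on version B (the rewrite author's own statement) =====
-- stated objective: alternative
-- what changed: B never builds the padded flat array or the rows*width grid read with r*width+c indexing: it deals each morse bit into a per-column bucket (index = running count mod width) in a single pass over the tokens, zero-pads the buckets of the final partial row, and concatenates the buckets.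
import Mathlib
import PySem

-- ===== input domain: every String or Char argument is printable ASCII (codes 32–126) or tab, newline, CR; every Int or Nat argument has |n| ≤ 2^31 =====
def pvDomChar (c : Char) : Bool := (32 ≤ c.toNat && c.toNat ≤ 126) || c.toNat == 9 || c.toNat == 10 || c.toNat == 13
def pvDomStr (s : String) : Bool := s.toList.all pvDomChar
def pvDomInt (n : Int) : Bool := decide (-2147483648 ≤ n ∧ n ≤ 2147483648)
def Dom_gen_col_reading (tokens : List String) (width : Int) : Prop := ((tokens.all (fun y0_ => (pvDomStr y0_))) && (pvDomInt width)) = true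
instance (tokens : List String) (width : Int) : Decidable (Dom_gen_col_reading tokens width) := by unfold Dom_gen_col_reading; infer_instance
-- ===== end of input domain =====

-- B replaces A's staged build (flat padded array, then a nested column×row read with r*width+c
-- indexing) by a single pass that distributes each morse bit into a per-column bucket as it is
-- produced, zero-pads the buckets of the final partial row, and concatenates the buckets.
-- Same result, alternative algorithm (no speed claim).

-- ===== PORT A =====
def MORSE : PySem.Dict String String := PySem.Dict.ofList [
  ("A", ".-"), ("B", "-..."), ("C", "-.-."), ("D", "-.."),
  ("E", "."), ("F", "..-."), ("G", "--."), ("H", "...."),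
  ("I", ".."), ("J", ".---"), ("K", "-.-"), ("L", ".-.."),
  ("M", "--"), ("N", "-."), ("O", "---"), ("P", ".--."),
  ("Q", "--.-"), ("R", ".-."), ("S", "..."), ("T", "-"),
  ("U", "..-"), ("V", "...-"), ("W", ".--"), ("X", "-..-"),
  ("Y", "-.--"), ("Z", "--..")]

-- MORSE[letter] raises KeyError on unknown keys; Pre_ excludes that, so the getD "" default is never hit.
def gen_symbol_stream (tokens : List String) (dot_val : Int) (dash_val : Int) : List Int :=
  tokens.foldl (fun bits t =>
    let letter := PySem.Str.upper t
    let morse := (MORSE.get? letter).getD ""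
    morse.toList.foldl (fun bits sym =>
      bits ++ [if sym = '.' then dot_val else dash_val]) bits) []

def gen_col_reading (tokens : List String) (width : Int) : List Int :=
  let symbols := gen_symbol_stream tokens 0 1
  let rows := PySem.Int.floordiv ((symbols.length : Int) + width - 1) width
  let grid_size := rows * width
  let padded := symbols ++ List.replicate (grid_size - (symbols.length : Int)).toNat 0
  (PySem.List.pyRange 0 width 1).foldl (fun result c =>
    (PySem.List.pyRange 0 rows 1).foldl (fun result r =>
      result ++ [PySem.List.pyGetD padded (r * width + c) 0]) result) []

-- ===== PORT B =====
-- cols[n % width].append(x) is an in-place update of bucket n % width; the port models it with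
-- List.modify at index (n % width).toNat — exact, since past the empty-cols early return we have
-- width > 0, hence 0 ≤ n % width < width = cols.length.
def gen_col_reading_alt (tokens : List String) (width : Int) : List Int :=
  let cols0 := (PySem.List.pyRange 0 width 1).map (fun _ => ([] : List Int))
  if cols0.isEmpty then [] else
  let st := tokens.foldl (fun (st : List (List Int) × Int) t =>
    ((MORSE.get? (PySem.Str.upper t)).getD "").toList.foldl
      (fun (st : List (List Int) × Int) sym =>
        (st.1.modify (PySem.Int.mod st.2 width).toNat
          (fun col => col ++ [if sym = '.' then (0 : Int) else 1]), st.2 + 1)) st) (cols0, 0)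
  let cols := if PySem.Int.mod st.2 width ≠ 0 then
      (PySem.List.pyRange (PySem.Int.mod st.2 width) width 1).foldl
        (fun cols c => cols.modify c.toNat (fun col => col ++ [(0 : Int)])) st.1
    else st.1
  cols.flatten

-- ===== PRECONDITION & SPEC =====
-- Pre_ excludes exactly the inputs where A raises: width = 0 (ZeroDivisionError) and tokens whose
-- upper-case form is not a MORSE key (KeyError).
def Pre_gen_col_reading (tokens : List String) (width : Int) : Prop :=
  width ≠ 0 ∧ tokens.all (fun t => (MORSE.get? (PySem.Str.upper t)).isSome) = true
instance (tokens : List String) (width : Int) : Decidable (Pre_gen_col_reading tokens width) := by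
  unfold Pre_gen_col_reading; infer_instance

def pvWitness_gen_col_reading : List String × Int := (["k", "R", "y", "P"], 3)

def Spec_gen_col_reading (tokens : List String) (width : Int) (out : List Int) : Prop := out = gen_col_reading_alt tokens width
instance (tokens : List String) (width : Int) (out : List Int) : Decidable (Spec_gen_col_reading tokens width out) := by unfold Spec_gen_col_reading; infer_instance

-- ===== CLAIM (what is proved, stated in full; the proofs are below) =====
def Claim_equal_gen_col_reading : Prop := ∀ (tokens : List String) (width : Int), Dom_gen_col_reading tokens width → Pre_gen_col_reading tokens width → Spec_gen_col_reading tokens width (gen_col_reading tokens width)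


-- ===== LEMMAS AND PROOFS =====

-- the bit appended for each morse symbol
def bitOf (sym : Char) : Int := if sym = '.' then 0 else 1

-- the subsequence of bits that lands in column c when bits are dealt round-robin over W buckets,
-- the counter starting at n
def colEnt (W c : Nat) : List Int → Nat → List Int
  | [], _ => []
  | b :: bs, n => (if n % W = c then [b] else []) ++ colEnt W c bs (n + 1)

theorem stream_eq (tokens : List String) :
    gen_symbol_stream tokens 0 1 = tokens.flatMap (fun t =>
      ((MORSE.get? (PySem.Str.upper t)).getD "").toList.map bitOf) := by
  unfold gen_symbol_stream bitOf
  simp only [PySem.List.foldl_append_singleton_eq_map, PySem.List.foldl_append_eq_flatMap,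
    List.nil_append]

theorem pyRange_zero_cast (b : Int) :
    PySem.List.pyRange 0 b 1 = (List.range b.toNat).map (Nat.cast : Nat → Int) := by
  rw [PySem.List.pyRange_one]
  simp only [Int.sub_zero]
  apply List.map_congr_left
  intro k _
  simp

theorem A_canon (padded : List Int) (rows width : Int) (rowsN wN : Nat)
    (hrw : rows = (rowsN : Int)) (hww : width = (wN : Int)) :
    (PySem.List.pyRange 0 width 1).foldl (fun result c =>
      (PySem.List.pyRange 0 rows 1).foldl (fun result r =>
        result ++ [PySem.List.pyGetD padded (r * width + c) 0]) result) []
    = (List.range wN).flatMap (fun c => (List.range rowsN).map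
        (fun r => padded.getD (r * wN + c) 0)) := by
  simp only [PySem.List.foldl_append_singleton_eq_map, PySem.List.foldl_append_eq_flatMap,
    List.nil_append]
  rw [hrw, hww, pyRange_zero_cast, pyRange_zero_cast, Int.toNat_natCast, Int.toNat_natCast]
  rw [List.flatMap_map]
  apply List.flatMap_congr
  intro c _
  rw [List.map_map]
  apply List.map_congr_left
  intro r _
  show PySem.List.pyGetD padded ((r : Int) * (wN : Int) + (c : Int)) 0 = _
  rw [show ((r : Int) * (wN : Int) + (c : Int)) = ((r * wN + c : Nat) : Int) by push_cast; ring]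
  rw [PySem.List.pyGetD_natCast]

-- a list is the range-map of its getD
theorem eq_map_range_getD (l : List (List Int)) (W : Nat) (hl : l.length = W) :
    l = (List.range W).map (fun c => l.getD c []) := by
  apply List.ext_getElem
  · simp [hl]
  · intro i h1 h2
    simp only [List.getElem_map, List.getElem_range]
    rw [List.getD_eq_getElem?_getD, List.getElem?_eq_getElem (by omega), Option.getD_some]

theorem getD_modify (l : List (List Int)) (i j : Nat) (f : List Int → List Int) :
    (l.modify i f).getD j [] = if i = j ∧ j < l.length then f (l.getD j []) else l.getD j [] := by
  rw [List.getD_eq_getElem?_getD, List.getD_eq_getElem?_getD, List.getElem?_modify]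
  by_cases hj : j < l.length
  · rw [List.getElem?_eq_getElem hj]
    by_cases hij : i = j <;> simp [hij, hj]
  · rw [List.getElem?_eq_none (by omega)]
    simp [hj]

-- B's token/symbol double loop is the same fold taken over the flattened bit stream
theorem distrib_eq (width : Int) (tokens : List String) (init : List (List Int) × Int) :
    tokens.foldl (fun (st : List (List Int) × Int) t =>
      ((MORSE.get? (PySem.Str.upper t)).getD "").toList.foldl
        (fun (st : List (List Int) × Int) sym =>
          (st.1.modify (PySem.Int.mod st.2 width).toNat
            (fun col => col ++ [if sym = '.' then (0 : Int) else 1]), st.2 + 1)) st) init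
    = (tokens.flatMap (fun t => ((MORSE.get? (PySem.Str.upper t)).getD "").toList.map bitOf)).foldl
        (fun (st : List (List Int) × Int) b =>
          (st.1.modify (PySem.Int.mod st.2 width).toNat (fun col => col ++ [b]), st.2 + 1)) init := by
  induction tokens generalizing init with
  | nil => rfl
  | cons t ts ih =>
    simp only [List.foldl_cons, List.flatMap_cons, List.foldl_append, List.foldl_map, ih, bitOf]

-- round-robin distribution: the fold leaves bucket c holding its old contents plus colEnt
theorem dist_lemma (W : Nat) (hW : 0 < W) (bits : List Int) :
    ∀ (cols : List (List Int)) (n : Nat), cols.length = W →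
    bits.foldl (fun (st : List (List Int) × Int) b =>
        (st.1.modify (PySem.Int.mod st.2 (W : Int)).toNat (fun col => col ++ [b]), st.2 + 1))
      (cols, (n : Int))
    = ((List.range W).map (fun c => cols.getD c [] ++ colEnt W c bits n),
       ((n + bits.length : Nat) : Int)) := by
  induction bits with
  | nil =>
    intro cols n hc
    simp only [List.foldl_nil, colEnt, List.append_nil, List.length_nil, Nat.add_zero]
    rw [← eq_map_range_getD cols W hc]
  | cons b bs ih =>
    intro cols n hc
    simp only [List.foldl_cons]
    rw [PySem.Int.mod_natCast, Int.toNat_natCast,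
      show ((n : Int) + 1) = ((n + 1 : Nat) : Int) by push_cast; ring]
    rw [ih (cols.modify (n % W) (fun col => col ++ [b])) (n + 1) (by simp [List.length_modify, hc])]
    rw [Prod.mk.injEq]
    constructor
    · apply List.map_congr_left
      intro c hcr
      rw [List.mem_range] at hcr
      rw [getD_modify]
      by_cases h : n % W = c
      · rw [if_pos ⟨h, by rw [hc]; exact hcr⟩]
        simp [colEnt, h]
      · rw [if_neg (by tauto)]
        simp only [colEnt, if_neg h, List.nil_append]
    · congr 1
      simp only [List.length_cons]
      omega

-- the padding fold appends one 0 to every bucket from m on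
theorem pad_lemma (W : Nat) : ∀ (m : Nat) (cols : List (List Int)), cols.length = W →
    (PySem.List.pyRange (m : Int) (W : Int) 1).foldl
        (fun cols c => cols.modify c.toNat (fun col => col ++ [(0 : Int)])) cols
    = (List.range W).map (fun c => cols.getD c [] ++ if m ≤ c then [0] else []) := by
  intro m
  induction hk : W - m generalizing m with
  | zero =>
    intro cols hc
    rw [PySem.List.pyRange_one_eq_nil (by omega), List.foldl_nil]
    conv_lhs => rw [eq_map_range_getD cols W hc]
    apply List.map_congr_left
    intro c hcr
    rw [List.mem_range] at hcr
    rw [if_neg (by omega), List.append_nil]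
  | succ k ih =>
    intro cols hc
    rw [PySem.List.pyRange_one_cons (by omega : (m : Int) < (W : Int)), List.foldl_cons,
      show ((m : Int) + 1) = ((m + 1 : Nat) : Int) by push_cast; ring, Int.toNat_natCast]
    rw [ih (m + 1) (by omega) (cols.modify m (fun col => col ++ [0]))
      (by simp [List.length_modify, hc])]
    apply List.map_congr_left
    intro c hcr
    rw [List.mem_range] at hcr
    rw [getD_modify]
    by_cases h : m = c
    · subst h
      rw [if_pos ⟨rfl, by rw [hc]; exact hcr⟩, if_neg (by omega : ¬ m + 1 ≤ m),
        List.append_nil, if_pos (le_refl m)]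
    · rw [if_neg (by tauto)]
      by_cases h2 : m ≤ c
      · rw [if_pos (by omega), if_pos h2]
      · rw [if_neg (by omega), if_neg h2]

-- colEnt as a filtered index list
theorem colEnt_filter (W c : Nat) (bits : List Int) :
    ∀ n, colEnt W c bits n
      = ((List.range bits.length).filter (fun i => (n + i) % W == c)).map (fun i => bits.getD i 0) := by
  induction bits with
  | nil => intro n; simp [colEnt]
  | cons b bs ih =>
    intro n
    have hpred : ∀ i ∈ List.range bs.length,
        ((fun i => (n + i) % W == c) ∘ Nat.succ) i = ((n + 1 + i) % W == c) := by
      intro i _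
      simp only [Function.comp]
      have : n + Nat.succ i = n + 1 + i := by omega
      rw [this]
    simp only [colEnt, List.length_cons, List.range_succ_eq_map, List.filter_cons,
      Nat.add_zero, List.filter_map, List.filter_congr hpred, ih (n + 1)]
    by_cases h : n % W = c <;>
      simp [h, Function.comp, List.getD_cons_succ]

-- the number of indices i < len with i % W = c
def colCnt (W c len : Nat) : Nat := (len + (W - 1 - c)) / W

theorem filter_range_mod (W c : Nat) (hW : 0 < W) (hc : c < W) :
    ∀ len, (List.range len).filter (fun i => i % W == c)
      = (List.range (colCnt W c len)).map (fun r => r * W + c) := by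
  intro len
  induction len with
  | zero =>
    rw [List.range_zero, List.filter_nil, colCnt, Nat.div_eq_of_lt (by omega), List.range_zero,
      List.map_nil]
  | succ len ih =>
    have hqm := Nat.div_add_mod len W
    set q := len / W with hq
    set m := len % W with hm
    rw [Nat.mul_comm] at hqm
    have hmW : m < W := Nat.mod_lt _ hW
    rw [List.range_succ, List.filter_append, ih]
    by_cases h : m = c
    · have hcnt : colCnt W c len = q := by
        rw [colCnt, show len + (W - 1 - c) = (W - 1) + q * W by omega,
          Nat.add_mul_div_right _ _ hW, Nat.div_eq_of_lt (by omega), Nat.zero_add]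
      have hcnt1 : colCnt W c (len + 1) = q + 1 := by
        rw [colCnt, show len + 1 + (W - 1 - c) = 0 + (q * W + W) by omega,
          show 0 + (q * W + W) = 0 + (q + 1) * W by ring,
          Nat.add_mul_div_right _ _ hW, Nat.div_eq_of_lt (by omega), Nat.zero_add]
      rw [hcnt, hcnt1, List.range_succ, List.map_append, List.filter_cons, List.filter_nil,
        if_pos (show ((len % W == c) = true) by simpa using h)]
      simp only [List.map_cons, List.map_nil]
      congr 2
      omega
    · have hcnt : colCnt W c (len + 1) = colCnt W c len := by
        rw [colCnt, colCnt, show len + (W - 1 - c) = (m + (W - 1 - c)) + q * W by omega,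
          show len + 1 + (W - 1 - c) = (m + 1 + (W - 1 - c)) + q * W by omega,
          Nat.add_mul_div_right _ _ hW, Nat.add_mul_div_right _ _ hW]
        by_cases h2 : c < m
        · rw [Nat.div_eq_of_lt_le (by omega : 1 * W ≤ m + (W - 1 - c)) (by omega : m + (W - 1 - c) < (1 + 1) * W),
            Nat.div_eq_of_lt_le (by omega : 1 * W ≤ m + 1 + (W - 1 - c)) (by omega : m + 1 + (W - 1 - c) < (1 + 1) * W)]
        · rw [Nat.div_eq_of_lt (by omega), Nat.div_eq_of_lt (by omega)]
      rw [hcnt, List.filter_cons, List.filter_nil]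
      rw [if_neg (by simpa using h), List.append_nil]

theorem lt_colCnt_iff (W c : Nat) (hW : 0 < W) (hc : c < W) (len r : Nat) :
    r < colCnt W c len ↔ r * W + c < len := by
  rw [colCnt, show r < (len + (W - 1 - c)) / W ↔ r + 1 ≤ (len + (W - 1 - c)) / W from Iff.rfl,
    Nat.le_div_iff_mul_le hW, Nat.add_mul, one_mul]
  omega

-- getD into the zero-padded stream
theorem padded_getD (bits : List Int) (p i : Nat) :
    (bits ++ List.replicate p (0 : Int)).getD i 0
      = if i < bits.length then bits.getD i 0 else 0 := by
  rw [List.getD_eq_getElem?_getD, List.getElem?_append]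
  by_cases h : i < bits.length
  · rw [if_pos h, if_pos h, List.getD_eq_getElem?_getD]
  · rw [if_neg h, if_neg h]
    rcases Nat.lt_or_ge (i - bits.length) p with h2 | h2
    · simp [List.getElem?_replicate, h2]
    · rw [List.getElem?_eq_none (by simp; omega)]; rfl

-- one column of A's canonical reading, as colEnt plus its padding zeros
theorem column_eq (W c len : Nat) (hW : 0 < W) (hc : c < W) (bits : List Int)
    (hlen : bits.length = len) (p : Nat) (R : Nat) (hR : R = (len + (W - 1)) / W) :
    colEnt W c bits 0 ++ (if len % W ≠ 0 ∧ len % W ≤ c then [0] else [])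
      = (List.range R).map (fun r => (bits ++ List.replicate p (0 : Int)).getD (r * W + c) 0) := by
  have hcol : colEnt W c bits 0 = (List.range (colCnt W c len)).map (fun r => bits.getD (r * W + c) 0) := by
    rw [colEnt_filter W c bits 0]
    simp only [Nat.zero_add, hlen]
    rw [filter_range_mod W c hW hc len, List.map_map]
    rfl
  have hqm := Nat.div_add_mod len W
  set q := len / W with hq
  set m := len % W with hm
  rw [Nat.mul_comm] at hqm
  have hmW : m < W := Nat.mod_lt _ hW
  have hcnt : colCnt W c len = if m ≠ 0 ∧ m ≤ c then R - 1 else R := by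
    rw [colCnt, hR]
    by_cases h0 : m = 0
    · rw [if_neg (by tauto), show len + (W - 1 - c) = (W - 1 - c) + q * W by omega,
        show len + (W - 1) = (W - 1) + q * W by omega,
        Nat.add_mul_div_right _ _ hW, Nat.add_mul_div_right _ _ hW,
        Nat.div_eq_of_lt (by omega), Nat.div_eq_of_lt (by omega)]
    · have hRv : (len + (W - 1)) / W = q + 1 := by
        rw [show len + (W - 1) = (m + (W - 1)) + q * W by omega, Nat.add_mul_div_right _ _ hW,
          Nat.div_eq_of_lt_le (by omega : 1 * W ≤ m + (W - 1)) (by omega : m + (W - 1) < (1 + 1) * W)]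
        omega
      rw [show len + (W - 1 - c) = (m + (W - 1 - c)) + q * W by omega,
        Nat.add_mul_div_right _ _ hW, hRv]
      by_cases h2 : m ≤ c
      · rw [if_pos (by tauto), Nat.div_eq_of_lt (by omega : m + (W - 1 - c) < W)]
        rw [Nat.zero_add, Nat.add_sub_cancel]
      · rw [if_neg (by tauto),
          Nat.div_eq_of_lt_le (by omega : 1 * W ≤ m + (W - 1 - c)) (by omega : m + (W - 1 - c) < (1 + 1) * W)]
        omega
  have hkcR : colCnt W c len ≤ R := by
    by_cases h : m ≠ 0 ∧ m ≤ c
    · rw [hcnt, if_pos h]; omega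
    · rw [hcnt, if_neg h]
  rw [show R = colCnt W c len + (R - colCnt W c len) by omega, List.range_add, List.map_append]
  congr 1
  · rw [hcol]
    apply List.map_congr_left
    intro r hr
    rw [List.mem_range] at hr
    rw [padded_getD, if_pos (by rw [hlen]; exact (lt_colCnt_iff W c hW hc len r).1 hr)]
  · have hdiff : R - colCnt W c len = if m ≠ 0 ∧ m ≤ c then 1 else 0 := by
      by_cases h : m ≠ 0 ∧ m ≤ c
      · rw [hcnt, if_pos h, if_pos h]
        rw [hR]
        have : 1 ≤ (len + (W - 1)) / W := by
          rw [Nat.le_div_iff_mul_le hW]; omega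
        omega
      · rw [hcnt, if_neg h, if_neg h]; omega
    by_cases h : m ≠ 0 ∧ m ≤ c
    · rw [if_pos h, hdiff, if_pos h]
      simp only [List.range_succ, List.range_zero, List.nil_append, List.map_cons, List.map_nil,
        List.map_map]
      rw [padded_getD, if_neg]
      rw [hlen]
      have := (lt_colCnt_iff W c hW hc len (colCnt W c len)).not.1 (by omega)
      omega
    · rw [if_neg h, hdiff, if_neg h, List.range_zero, List.map_nil, List.map_nil]

-- ===== VERDICT (by name: the statement is the Claim_ definition above) =====
theorem gen_col_reading_spec : Claim_equal_gen_col_reading := by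
  intro tokens width _hdom hpre
  obtain ⟨hw0, -⟩ := hpre
  unfold Spec_gen_col_reading gen_col_reading gen_col_reading_alt
  dsimp only
  rcases lt_or_gt_of_ne hw0 with hw | hw
  · -- width < 0 : A's column loop is empty and B has no buckets; both return []
    rw [PySem.List.pyRange_one_eq_nil (le_of_lt hw), List.foldl_nil, List.map_nil]
    rfl
  · -- width > 0
    set W : Nat := width.toNat with hWdef
    have hww : width = (W : Int) := by omega
    have hW : 0 < W := by omega
    set bits : List Int := tokens.flatMap (fun t =>
      ((MORSE.get? (PySem.Str.upper t)).getD "").toList.map bitOf) with hbits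
    set len : Nat := bits.length with hlen
    set R : Nat := (len + (W - 1)) / W with hRdef
    -- A side
    have hrows : PySem.Int.floordiv (((bits.length) : Int) + width - 1) width
        = (R : Int) := by
      rw [← hlen,
        show (len : Int) + width - 1 = ((len + (W - 1) : Nat) : Int) by rw [hww]; push_cast; omega,
        hww, PySem.Int.floordiv_natCast, hRdef]
    rw [stream_eq, ← hbits, hrows]
    set padded : List Int := bits ++ List.replicate (((R : Int)) * width - (bits.length : Int)).toNat 0
      with hpadded
    rw [A_canon padded (R : Int) width R W rfl hww]
    -- B side
    have hcols0 : (PySem.List.pyRange 0 width 1).map (fun _ => ([] : List Int))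
        = List.replicate W ([] : List Int) := by
      rw [hww, pyRange_zero_cast, Int.toNat_natCast, List.map_map]
      simp only [Function.comp_def]
      rw [List.map_const', List.length_range]
    rw [hcols0, if_neg (by simp [hW.ne'])]
    rw [distrib_eq, ← hbits,
      show (List.replicate W ([] : List Int), (0 : Int))
        = (List.replicate W ([] : List Int), ((0 : Nat) : Int)) by simp]
    rw [show (fun (st : List (List Int) × Int) b =>
          (st.1.modify (PySem.Int.mod st.2 width).toNat (fun col => col ++ [b]), st.2 + 1))
        = (fun (st : List (List Int) × Int) b =>
          (st.1.modify (PySem.Int.mod st.2 ((W : Nat) : Int)).toNat (fun col => col ++ [b]), st.2 + 1))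
        by rw [← hww]]
    rw [dist_lemma W hW bits (List.replicate W []) 0 (List.length_replicate)]
    have hbase : (List.range W).map (fun c => (List.replicate W ([] : List Int)).getD c [] ++ colEnt W c bits 0)
        = (List.range W).map (fun c => colEnt W c bits 0) := by
      apply List.map_congr_left
      intro c hcr
      rw [List.mem_range] at hcr
      rw [List.getD_replicate _ hcr, List.nil_append]
    simp only
    rw [hbase, Nat.zero_add, ← hlen, hww, PySem.Int.mod_natCast]
    by_cases hm : len % W = 0
    · rw [if_neg (by simp [hm]), ← List.flatMap_def]
      apply List.flatMap_congr
      intro c hcr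
      rw [List.mem_range] at hcr
      rw [← List.append_nil (colEnt W c bits 0),
        show ([] : List Int) = (if len % W ≠ 0 ∧ len % W ≤ c then [0] else []) by simp [hm],
        hpadded]
      exact (column_eq W c len hW hcr bits hlen.symm _ R hRdef).symm
    · rw [if_pos (by exact_mod_cast hm)]
      rw [show ((len % W : Nat) : Int) = (((len % W : Nat) : Nat) : Int) from rfl]
      rw [pad_lemma W (len % W) ((List.range W).map (fun c => colEnt W c bits 0))
        (by simp)]
      rw [← List.flatMap_def]
      apply List.flatMap_congr
      intro c hcr
      rw [List.mem_range] at hcr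
      rw [PySem.List.getD_map_range _ _ _ _ hcr,
        show (if len % W ≤ c then [(0 : Int)] else []) = (if len % W ≠ 0 ∧ len % W ≤ c then [0] else [])
          by simp [hm],
        hpadded]
      exact (column_eq W c len hW hcr bits hlen.symm _ R hRdef).symm
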